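-- pv_equiv track=rewrite | github.com/imaciasm/Analisis_Bacilo_koch | Analisis_Bacilo_koch/utilities/ej_2_1.py | clases_listado
-- ===== SOURCE A (Python) =====
-- def clases_listado(clases, orfs, descriptions, listado):
--     """
--     Dado un listado de patrones busca las clases las
--     clases que contienen ORFs con esa descripcion y
--     sus ORFS
--
--     :param clases: lista de todas las clases
--     :param orfs: lista de todos los orfs
--     :param descriptions: listas de todas las descripciones
--     :param listado: listado de patrones
--     :return: clases_escogidas: list - clases con ORFS con el patron
--              ORFS_escogidos: list - ORFS con el menos un patron de los listados
--     """
--     clases_escogidas = {}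
--     orfs_escogidos = {}
--     for patron in listado:
--         clases_patron = []
--         orfs_patron = []
--         for clase, orf, description in zip(clases, orfs, descriptions):
--             if patron.lower() in description:
--                 clases_patron.append(clase)
--                 orfs_patron.append(orf)
--         clases_escogidas[patron] = len(set(clases_patron))
--         orfs_escogidos[patron] = set(orfs_patron)
--     return clases_escogidas, orfs_escogidos
-- ===== SOURCE B (Python) =====
-- def clases_listado(clases, orfs, descriptions, listado):
--     """N-gram index matching: instead of running a substring search for every
--     (pattern, description) pair, enumerate each description's substrings of the
--     relevant lengths once and look them up in a hash set of lowered patterns."""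
--     entries = {}  # pattern -> (lowered pattern, clase-set, orf-set)
--     for p in listado:
--         if p not in entries:
--             entries[p] = (p.lower(), set(), set())
--     grams = {e[0] for e in entries.values()}
--     lens = sorted({len(g) for g in grams})
--     for clase, orf, d in zip(clases, orfs, descriptions):
--         n = len(d)
--         found = set()
--         for k in lens:
--             for i in range(n - k + 1):
--                 g = d[i:i + k]
--                 if g in grams:
--                     found.add(g)
--         for low, cset, oset in entries.values():
--             if low in found:
--                 cset.add(clase)
--                 oset.add(orf)
--     return ({p: len(e[1]) for p, e in entries.items()},
--             {p: e[2] for p, e in entries.items()})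
-- ===== Notes on version B (the rewrite author's own statement) =====
-- stated objective: faster
-- what changed: B replaces A's per-(pattern,description) substring searches by n-gram hash-set matching: it builds a hash set of the lowered patterns once, enumerates each description's substrings of the occurring pattern lengths in one pass, and records which patterns occur via set lookups, so no substring search is run per pattern.
import Mathlib
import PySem

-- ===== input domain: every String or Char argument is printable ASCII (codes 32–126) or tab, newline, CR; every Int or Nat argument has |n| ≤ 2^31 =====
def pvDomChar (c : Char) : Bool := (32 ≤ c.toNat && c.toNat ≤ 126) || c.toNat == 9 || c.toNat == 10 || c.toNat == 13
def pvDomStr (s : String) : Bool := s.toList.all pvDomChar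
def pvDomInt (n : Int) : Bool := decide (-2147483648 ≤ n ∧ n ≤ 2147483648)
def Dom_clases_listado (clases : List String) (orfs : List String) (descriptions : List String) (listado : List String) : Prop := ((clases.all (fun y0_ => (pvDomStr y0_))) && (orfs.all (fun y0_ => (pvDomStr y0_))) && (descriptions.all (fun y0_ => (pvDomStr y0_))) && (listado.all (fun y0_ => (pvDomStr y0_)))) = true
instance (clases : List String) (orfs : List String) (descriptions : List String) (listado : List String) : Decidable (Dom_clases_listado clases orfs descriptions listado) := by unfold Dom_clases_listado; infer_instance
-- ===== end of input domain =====

-- B replaces A's per-(pattern,description) substring searches by n-gram hash-set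
-- matching (enumerate each description's substrings of the occurring pattern
-- lengths once, look them up in a set of lowered patterns); same return value.

-- ===== PORT A =====
-- inner loop of A: collect (clases_patron, orfs_patron) for one pattern
def pvAInner (patron : String) (rows : List ((String × String) × String)) :
    List String × List String :=
  rows.foldl
    (fun pr r =>
      if PySem.Str.isIn (PySem.Str.lower patron) r.2 then
        (pr.1 ++ [r.1.1], pr.2 ++ [r.1.2])
      else pr)
    ([], [])

def clases_listado (clases : List String) (orfs : List String) (descriptions : List String) (listado : List String) : (List (String × Int)) × (List (String × List String)) :=
  let rows := (clases.zip orfs).zip descriptions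
  let final :=
    listado.foldl
      (fun (st : PySem.Dict String Int × PySem.Dict String (PySem.Set String)) patron =>
        (st.1.insert patron (((PySem.Set.ofList (pvAInner patron rows).1).length : Int)),
         st.2.insert patron (PySem.Set.ofList (pvAInner patron rows).2)))
      (PySem.Dict.mk [], PySem.Dict.mk [])
  (final.1.items, final.2.items)

-- ===== PORT B =====
-- B: inner loop over the start positions for one pattern length k
def pvScanLen (grams : PySem.Set String) (d : String) (found : PySem.Set String) (k : Int) : PySem.Set String :=
  (PySem.List.pyRange 0 (PySem.Str.len d - k + 1) 1).foldl
    (fun f i =>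
      if grams.contains (PySem.Str.slice d (some i) (some (i + k))) then
        f.add (PySem.Str.slice d (some i) (some (i + k)))
      else f)
    found

-- B: the set of lowered patterns that occur in description d (n-gram lookups)
def pvFoundGrams (grams : PySem.Set String) (lens : List Int) (d : String) : PySem.Set String :=
  lens.foldl (pvScanLen grams d) PySem.Set.empty

-- B: update one pattern's entry from one data row, given the row's found-set
def pvBStep (found : PySem.Set String) (r : (String × String) × String)
    (e : String × String × PySem.Set String × PySem.Set String) :
    String × String × PySem.Set String × PySem.Set String :=
  if found.contains e.2.1 then
    (e.1, e.2.1, e.2.2.1.add r.1.1, e.2.2.2.add r.1.2)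
  else e

def clases_listado_alt (clases : List String) (orfs : List String) (descriptions : List String) (listado : List String) : (List (String × Int)) × (List (String × List String)) :=
  let rows := (clases.zip orfs).zip descriptions
  let entries := (PySem.List.dedup listado).map
    (fun p => (p, PySem.Str.lower p, (PySem.Set.empty : PySem.Set String),
               (PySem.Set.empty : PySem.Set String)))
  let grams : PySem.Set String := PySem.Set.ofList (entries.map (fun e => e.2.1))
  let lens : List Int :=
    PySem.List.sorted (PySem.Set.ofList (grams.map PySem.Str.len)) (fun x => x) false
  let final := rows.foldl
    (fun acc r => acc.map (pvBStep (pvFoundGrams grams lens r.2) r)) entries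
  (final.map (fun e => (e.1, (e.2.2.1.length : Int))),
   final.map (fun e => (e.1, e.2.2.2)))

-- ===== PRECONDITION & SPEC =====
def Spec_clases_listado (clases : List String) (orfs : List String) (descriptions : List String) (listado : List String) (out : (List (String × Int)) × (List (String × List String))) : Prop := out = clases_listado_alt clases orfs descriptions listado
instance (clases : List String) (orfs : List String) (descriptions : List String) (listado : List String) (out : (List (String × Int)) × (List (String × List String))) : Decidable (Spec_clases_listado clases orfs descriptions listado out) := by unfold Spec_clases_listado; infer_instance

-- ===== CLAIM (what is proved, stated in full; the proofs are below) =====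
def Claim_equal_clases_listado : Prop := ∀ (clases : List String) (orfs : List String) (descriptions : List String) (listado : List String), Dom_clases_listado clases orfs descriptions listado → Spec_clases_listado clases orfs descriptions listado (clases_listado clases orfs descriptions listado)

-- ===== LEMMAS AND PROOFS =====

-- folding "insert k (f k)" over ks = mapping f over the deduplicated key list
theorem pv_insert_fold {V : Type} (f : String → V) (ks : List String) (s : List String) :
    (ks.foldl (fun d k => d.insert k (f k)) (PySem.Dict.mk (s.map (fun k => (k, f k))))).items
      = (ks.foldl PySem.Set.add s).map (fun k => (k, f k)) := by
  induction ks generalizing s with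
  | nil => rfl
  | cons k ks ih =>
      have hstep : (PySem.Dict.mk (s.map (fun k => (k, f k)))).insert k (f k)
          = PySem.Dict.mk ((PySem.Set.add s k).map (fun k => (k, f k))) := by
        by_cases h : k ∈ s
        · have hc : (PySem.Dict.mk (s.map (fun k => (k, f k)))).contains k = true := by
            simp [PySem.Dict.contains, List.any_map, Function.comp]
            exact h
          simp only [PySem.Dict.insert, hc, if_pos, PySem.Set.add, PySem.Set.contains]
          have hmem : List.contains s k = true := by simpa using h
          rw [if_pos hmem, List.map_map]
          congr 1
          apply List.map_congr_left
          intro x _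
          by_cases hx : x = k
          · subst hx; simp [Function.comp]
          · simp [Function.comp, hx]
        · have hc : (PySem.Dict.mk (s.map (fun k => (k, f k)))).contains k = false := by
            simp [PySem.Dict.contains, List.any_map, Function.comp]
            exact fun x hx hxk => h (hxk ▸ hx)
          have hmem : List.contains s k = false := by simpa using h
          simp only [PySem.Dict.insert, hc, Bool.false_eq_true, PySem.Set.add,
            PySem.Set.contains, hmem]
          simp
      simp only [List.foldl_cons, hstep, PySem.Set.add]
      exact ih _

-- pushing a row-wise map-fold inside: each entry evolves independently
theorem pv_foldl_map {α β : Type} (g : β → α → α) (rows : List β) (init : List α) :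
    rows.foldl (fun acc r => acc.map (g r)) init
      = init.map (fun e => rows.foldl (fun e' r => g r e') e) := by
  induction rows generalizing init with
  | nil => simp
  | cons r rs ih =>
      simp only [List.foldl_cons, ih, List.map_map]
      rfl

-- membership after a fold of conditional set-adds
theorem pv_mem_foldl_add_if {β : Type} (c : β → Bool) (g : β → String) (L : List β)
    (s0 : PySem.Set String) (y : String) :
    (y ∈ L.foldl (fun s i => if c i then PySem.Set.add s (g i) else s) s0)
      ↔ y ∈ s0 ∨ ∃ i ∈ L, c i = true ∧ g i = y := by
  induction L generalizing s0 with
  | nil => simp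
  | cons a L ih =>
      simp only [List.foldl_cons]
      by_cases h : c a = true
      · rw [if_pos h, ih]
        simp only [PySem.Set.mem_add, List.mem_cons]
        constructor
        · rintro (⟨hy | hy⟩ | ⟨i, hi, hc, hg⟩)
          · exact Or.inl hy
          · exact Or.inr ⟨a, Or.inl rfl, h, hy.symm⟩
          · exact Or.inr ⟨i, Or.inr hi, hc, hg⟩
        · rintro (hy | ⟨i, (rfl | hi), hc, hg⟩)
          · exact Or.inl (Or.inl hy)
          · exact Or.inl (Or.inr hg.symm)
          · exact Or.inr ⟨i, hi, hc, hg⟩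
      · rw [if_neg h, ih]
        simp only [List.mem_cons]
        constructor
        · rintro (hy | ⟨i, hi, hc, hg⟩)
          · exact Or.inl hy
          · exact Or.inr ⟨i, Or.inr hi, hc, hg⟩
        · rintro (hy | ⟨i, (rfl | hi), hc, hg⟩)
          · exact Or.inl hy
          · exact absurd hc h
          · exact Or.inr ⟨i, hi, hc, hg⟩

-- membership in one row's found-set
theorem pv_mem_foundGrams (grams : PySem.Set String) (lens : List Int) (d : String) (y : String) :
    y ∈ pvFoundGrams grams lens d
      ↔ ∃ k ∈ lens, ∃ i ∈ PySem.List.pyRange 0 (PySem.Str.len d - k + 1) 1,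
          grams.contains (PySem.Str.slice d (some i) (some (i + k))) = true ∧
          PySem.Str.slice d (some i) (some (i + k)) = y := by
  have main : ∀ (ls : List Int) (f0 : PySem.Set String),
      y ∈ ls.foldl (pvScanLen grams d) f0
        ↔ y ∈ f0 ∨ ∃ k ∈ ls, ∃ i ∈ PySem.List.pyRange 0 (PySem.Str.len d - k + 1) 1,
            grams.contains (PySem.Str.slice d (some i) (some (i + k))) = true ∧
            PySem.Str.slice d (some i) (some (i + k)) = y := by
    intro ls
    induction ls with
    | nil => simp
    | cons k ks ih =>
        intro f0
        simp only [List.foldl_cons, ih, pvScanLen,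
          pv_mem_foldl_add_if
            (fun i => grams.contains (PySem.Str.slice d (some i) (some (i + k))))
            (fun i => PySem.Str.slice d (some i) (some (i + k)))]
        constructor
        · rintro ((hy | ⟨i, hi, hc, hg⟩) | ⟨k', hk', rest⟩)
          · exact Or.inl hy
          · exact Or.inr ⟨k, List.mem_cons_self, i, hi, hc, hg⟩
          · exact Or.inr ⟨k', List.mem_cons_of_mem _ hk', rest⟩
        · rintro (hy | ⟨k', hk', rest⟩)
          · exact Or.inl (Or.inl hy)
          · rcases List.mem_cons.mp hk' with rfl | hk'
            · exact Or.inl (Or.inr rest)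
            · exact Or.inr ⟨k', hk', rest⟩
  rw [pvFoundGrams, main]
  simp [PySem.Set.empty]

-- for a pattern q whose length occurs in lens, found-membership IS substring search
theorem pv_found_eq_isIn (grams : PySem.Set String) (lens : List Int) (d q : String)
    (hnn : ∀ k ∈ lens, 0 ≤ k)
    (hq : q ∈ grams) (hk : PySem.Str.len q ∈ lens) :
    (pvFoundGrams grams lens d).contains q = PySem.Str.isIn q d := by
  apply Bool.coe_iff_coe.mp
  rw [PySem.Set.contains_iff, pv_mem_foundGrams, PySem.Str.isIn_iff_infix]
  constructor
  · rintro ⟨k, hkmem, i, hi, _, hg⟩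
    rcases PySem.List.mem_pyRange_one.mp hi with ⟨hi0, _⟩
    have hk0 : (0:Int) ≤ k := hnn k hkmem
    have hql : q.toList
        = List.take ((i + k).toNat - i.toNat) (List.drop i.toNat d.toList) := by
      rw [← hg, PySem.Str.toList_slice, PySem.Chars.slice_eq_listSlice,
        PySem.List.slice_toNat d.toList hi0 (by omega)]
    rw [hql]
    exact ((List.take_prefix _ _).isInfix).trans ((List.drop_suffix _ _).isInfix)
  · rintro ⟨s, t, hd⟩
    have hkq : PySem.Str.len q = (q.toList.length : Int) := PySem.Str.len_eq q
    have hld : PySem.Str.len d = (d.toList.length : Int) := PySem.Str.len_eq d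
    have hlen : d.toList.length = s.length + q.toList.length + t.length := by
      rw [← hd]; simp; omega
    have hslice : PySem.Str.slice d (some (s.length : Int))
        (some ((s.length : Int) + PySem.Str.len q)) = q := by
      apply String.toList_inj.mp
      rw [PySem.Str.toList_slice, PySem.Chars.slice_eq_listSlice, hkq]
      rw [PySem.List.slice_toNat d.toList (by positivity) (by positivity)]
      have h1 : ((s.length : Int)).toNat = s.length := Int.toNat_natCast _
      have h2 : (((s.length : Int)) + ((q.toList.length : Int))).toNat
          = s.length + q.toList.length := by omega
      rw [h1, h2, ← hd, List.append_assoc, List.drop_left,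
        Nat.add_sub_cancel_left, List.take_left]
    refine ⟨PySem.Str.len q, hk, (s.length : Int), ?_, ?_, hslice⟩
    · rw [PySem.List.mem_pyRange_one]
      constructor
      · exact Int.natCast_nonneg s.length
      · rw [hld, hkq]; omega
    · rw [hslice]; exact (PySem.Set.contains_iff _ _).mpr hq

-- one pattern's row fold in B = set-of-list of A's collected lists
theorem pv_per_pattern (grams : PySem.Set String) (lens : List Int) (p low : String)
    (hc : ∀ d : String, (pvFoundGrams grams lens d).contains low = PySem.Str.isIn low d)
    (rows : List ((String × String) × String)) (l1 l2 : List String) :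
    rows.foldl (fun e' r => pvBStep (pvFoundGrams grams lens r.2) r e')
        (p, low, PySem.Set.ofList l1, PySem.Set.ofList l2)
      = (p, low,
         PySem.Set.ofList (rows.foldl (fun pr r => if PySem.Str.isIn low r.2 then (pr.1 ++ [r.1.1], pr.2 ++ [r.1.2]) else pr) (l1, l2)).1,
         PySem.Set.ofList (rows.foldl (fun pr r => if PySem.Str.isIn low r.2 then (pr.1 ++ [r.1.1], pr.2 ++ [r.1.2]) else pr) (l1, l2)).2) := by
  induction rows generalizing l1 l2 with
  | nil => simp
  | cons r rs ih =>
      rw [List.foldl_cons]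
      by_cases h : PySem.Str.isIn low r.2 = true
      · rw [show pvBStep (pvFoundGrams grams lens r.2) r (p, low, PySem.Set.ofList l1, PySem.Set.ofList l2)
              = (p, low, PySem.Set.ofList (l1 ++ [r.1.1]), PySem.Set.ofList (l2 ++ [r.1.2])) from by
            simp only [pvBStep, hc r.2]
            rw [if_pos h]
            simp [PySem.Set.ofList, List.foldl_append]]
        rw [ih]
        simp only [List.foldl_cons]
        rw [if_pos h]
      · rw [show pvBStep (pvFoundGrams grams lens r.2) r (p, low, PySem.Set.ofList l1, PySem.Set.ofList l2)
              = (p, low, PySem.Set.ofList l1, PySem.Set.ofList l2) from by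
            simp only [pvBStep, hc r.2]
            rw [if_neg h]]
        rw [ih]
        simp only [List.foldl_cons]
        rw [if_neg h]

-- ===== VERDICT (by name: the statement is the Claim_ definition above) =====
theorem clases_listado_spec : Claim_equal_clases_listado := by
  intro clases orfs descriptions listado _
  unfold Spec_clases_listado clases_listado clases_listado_alt
  dsimp only
  rw [PySem.List.foldl_prod_mk
        (fun d patron => PySem.Dict.insert d patron (((PySem.Set.ofList (pvAInner patron ((clases.zip orfs).zip descriptions)).1).length : Int)))
        (fun d patron => PySem.Dict.insert d patron (PySem.Set.ofList (pvAInner patron ((clases.zip orfs).zip descriptions)).2))]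
  rw [pv_foldl_map]
  simp only [List.map_map]
  have hA1 := pv_insert_fold (fun p => ((PySem.Set.ofList (pvAInner p ((clases.zip orfs).zip descriptions)).1).length : Int)) listado []
  have hA2 := pv_insert_fold (fun p => PySem.Set.ofList (pvAInner p ((clases.zip orfs).zip descriptions)).2) listado []
  simp only [List.map_nil] at hA1 hA2
  -- the shared index data of B
  have hfold : listado.foldl PySem.Set.add [] = PySem.List.dedup listado := by
    rw [PySem.List.dedup_eq_ofList]; rfl
  -- per-pattern condition equality, for every pattern of the listado
  have hc : ∀ p ∈ PySem.List.dedup listado, ∀ d : String,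
      (pvFoundGrams
        (PySem.Set.ofList ((PySem.List.dedup listado).map PySem.Str.lower))
        (PySem.List.sorted
          (PySem.Set.ofList ((PySem.Set.ofList ((PySem.List.dedup listado).map PySem.Str.lower)).map PySem.Str.len))
          (fun x => x) false) d).contains (PySem.Str.lower p)
      = PySem.Str.isIn (PySem.Str.lower p) d := by
    intro p hp d
    have hq : PySem.Str.lower p ∈ PySem.Set.ofList ((PySem.List.dedup listado).map PySem.Str.lower) :=
      (PySem.Set.mem_ofList _ _).mpr (List.mem_map_of_mem hp)
    apply pv_found_eq_isIn
    · intro k hk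
      rcases List.mem_map.mp ((PySem.Set.mem_ofList _ _).mp ((PySem.List.mem_sorted _ _ _ _).mp hk)) with ⟨g, _, rfl⟩
      rw [PySem.Str.len_eq]
      exact Int.natCast_nonneg _
    · exact hq
    · exact (PySem.List.mem_sorted _ _ _ _).mpr
        ((PySem.Set.mem_ofList _ _).mpr (List.mem_map_of_mem hq))
  refine Prod.ext ?_ ?_
  · show (listado.foldl _ (PySem.Dict.mk [])).items = _
    rw [hA1, hfold]
    apply List.map_congr_left
    intro p hp
    simp only [Function.comp_apply]
    simp only [Function.comp_def]
    have hp' := pv_per_pattern _ _ p (PySem.Str.lower p) (hc p hp)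
      ((clases.zip orfs).zip descriptions) [] []
    rw [show (PySem.Set.empty : PySem.Set String) = PySem.Set.ofList [] from rfl, hp']
    simp [pvAInner]
  · show (listado.foldl _ (PySem.Dict.mk [])).items = _
    rw [hA2, hfold]
    apply List.map_congr_left
    intro p hp
    simp only [Function.comp_apply]
    simp only [Function.comp_def]
    have hp' := pv_per_pattern _ _ p (PySem.Str.lower p) (hc p hp)
      ((clases.zip orfs).zip descriptions) [] []
    rw [show (PySem.Set.empty : PySem.Set String) = PySem.Set.ofList [] from rfl, hp']
    simp [pvAInner]
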